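-- pv_equiv track=rewrite | github.com/AzamatErgashov/tug_of_war_arqontortish_8 | tug_of_war_arqontortish.py | leftrightdiffence
-- ===== SOURCE A (Python) =====
-- def sign(num):
--     if num > 0:
--         return 1
--     elif num < 0:
--         return -1
--     return 0
--
-- def leftrightdiffence(nums):
--     left, right = 0, sum(nums)
--
--     result = []
--
--     for num in nums:
--         right -= num
--         result.append(sign(right - left))
--         left += num
--
--     return result
-- ===== SOURCE B (Python) =====
-- def leftrightdiffence(nums):
--     total = sum(nums)
--     # divide and conquer: result for seg with "constant" c is sign(c - 2*prefix_i - seg[i]);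
--     # the right half's constant shifts by 2*sum(left half)
--     def solve(seg, c):
--         if len(seg) == 0:
--             return []
--         if len(seg) == 1:
--             x = c - seg[0]
--             return [1 if x > 0 else -1 if x < 0 else 0]
--         m = len(seg) // 2
--         left = seg[:m]
--         return solve(left, c) + solve(seg[m:], c - 2 * sum(left))
--     return solve(nums, total)
-- ===== Notes on version B (the rewrite author's own statement) =====
-- stated objective: alternative
-- what changed: Replaces A's single left/right running-accumulator loop by a divide-and-conquer recursion: split the list in half, solve each half independently with a shifted constant (c - 2*sum(left half)), and concatenate; correctness rests on sign(right-left) at i = sign(total - 2*prefix_i - nums[i]).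
import Mathlib
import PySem

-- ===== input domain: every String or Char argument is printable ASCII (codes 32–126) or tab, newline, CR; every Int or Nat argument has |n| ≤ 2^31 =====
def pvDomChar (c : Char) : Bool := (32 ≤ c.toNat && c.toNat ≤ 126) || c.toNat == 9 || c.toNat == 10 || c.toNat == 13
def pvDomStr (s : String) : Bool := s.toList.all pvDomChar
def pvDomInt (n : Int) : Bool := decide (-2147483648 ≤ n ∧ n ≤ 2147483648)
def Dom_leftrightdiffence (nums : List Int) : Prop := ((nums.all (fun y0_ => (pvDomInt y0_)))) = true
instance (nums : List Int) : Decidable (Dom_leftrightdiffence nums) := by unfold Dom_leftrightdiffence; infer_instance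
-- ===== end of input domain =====

-- B is a divide-and-conquer recursion over halves instead of A's running-accumulator loop (alternative decomposition, not faster).
-- ===== PORT A =====
def signA (num : Int) : Int := if num > 0 then 1 else if num < 0 then -1 else 0

def leftrightdiffence (nums : List Int) : List Int :=
  (nums.foldl
    (fun (st : Int × Int × List Int) num =>
      let right := st.2.1 - num
      (st.1 + num, right, st.2.2 ++ [signA (right - st.1)]))
    (0, nums.sum, [])).2.2

-- ===== PORT B =====
-- solve(seg, c): element i is sign(c - 2*sum(seg[:i]) - seg[i]); recursion on halves as in Source B
def solveB (seg : List Int) (c : Int) : List Int :=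
  if h0 : seg.length = 0 then []
  else if h1 : seg.length = 1 then
    let x := c - seg.headI   -- seg[0]; headI is exact here since seg ≠ []
    [if x > 0 then 1 else if x < 0 then -1 else 0]
  else
    let m := seg.length / 2
    let left := seg.take m
    solveB left c ++ solveB (seg.drop m) (c - 2 * left.sum)
termination_by seg.length
decreasing_by
  · simp only [List.length_take]; omega
  · simp only [List.length_drop]; omega

def leftrightdiffence_alt (nums : List Int) : List Int :=
  solveB nums nums.sum

-- ===== PRECONDITION & SPEC =====
def Spec_leftrightdiffence (nums : List Int) (out : List Int) : Prop := out = leftrightdiffence_alt nums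
instance (nums : List Int) (out : List Int) : Decidable (Spec_leftrightdiffence nums out) := by unfold Spec_leftrightdiffence; infer_instance

-- ===== CLAIM (what is proved, stated in full; the proofs are below) =====
def Claim_equal_leftrightdiffence : Prop := ∀ (nums : List Int), Dom_leftrightdiffence nums → Spec_leftrightdiffence nums (leftrightdiffence nums)

-- ===== LEMMAS AND PROOFS =====

-- common reference list: element i is signA (c - P_i - P_{i+1}) with P the prefix sums from l
def goRef (c : Int) : Int → List Int → List Int
| _, [] => []
| l, x :: xs => signA (c - l - (l + x)) :: goRef c (l + x) xs

theorem goRef_congr (xs : List Int) (c l c' l' : Int) (h : c - 2 * l = c' - 2 * l') :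
    goRef c l xs = goRef c' l' xs := by
  induction xs generalizing l l' with
  | nil => simp [goRef]
  | cons x xs ih =>
      simp only [goRef]
      rw [show c - l - (l + x) = c' - l' - (l' + x) by omega, ih (l + x) (l' + x) (by omega)]

theorem goRef_append (c : Int) (a b : List Int) (l : Int) :
    goRef c l (a ++ b) = goRef c l a ++ goRef c (l + a.sum) b := by
  induction a generalizing l with
  | nil => simp [goRef]
  | cons x xs ih =>
      simp only [List.cons_append, goRef, ih (l + x), List.sum_cons]
      rw [show l + x + xs.sum = l + (x + xs.sum) by ring]

theorem A_fold_eq_goRef (total l : Int) (acc : List Int) (xs : List Int) :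
    (xs.foldl
      (fun (st : Int × Int × List Int) num =>
        let right := st.2.1 - num
        (st.1 + num, right, st.2.2 ++ [signA (right - st.1)]))
      (l, total - l, acc)).2.2 = acc ++ goRef total l xs := by
  induction xs generalizing l acc with
  | nil => simp [goRef]
  | cons x xs ih =>
      simp only [List.foldl_cons, goRef]
      calc (xs.foldl _ (l + x, total - l - x, acc ++ [signA (total - l - x - l)])).2.2
          = acc ++ [signA (total - l - x - l)] ++ goRef total (l + x) xs := by
            have := ih (l + x) (acc ++ [signA (total - l - x - l)])
            rw [show total - (l + x) = total - l - x by ring] at this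
            exact this
        _ = acc ++ (signA (total - l - (l + x)) :: goRef total (l + x) xs) := by
            rw [show total - l - x - l = total - l - (l + x) by ring]
            simp

theorem solveB_eq_goRef (n : Nat) :
    ∀ seg : List Int, seg.length ≤ n → ∀ c, solveB seg c = goRef c 0 seg := by
  induction n with
  | zero =>
      intro seg h c
      have : seg = [] := List.eq_nil_of_length_eq_zero (by omega)
      subst this
      rw [solveB]; simp [goRef]
  | succ n ih =>
      intro seg hlen c
      by_cases h0 : seg.length = 0
      · have : seg = [] := List.eq_nil_of_length_eq_zero h0
        subst this
        rw [solveB]; simp [goRef]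
      · by_cases h1 : seg.length = 1
        · obtain ⟨x, rfl⟩ := List.length_eq_one_iff.mp h1
          rw [solveB]
          simp [goRef, signA, List.headI]
        · rw [solveB, dif_neg h0, dif_neg h1]
          have hm1 : 1 ≤ seg.length / 2 := by omega
          have hmlt : seg.length / 2 < seg.length := by omega
          have htake : (seg.take (seg.length / 2)).length ≤ n := by
            simp only [List.length_take]; omega
          have hdrop : (seg.drop (seg.length / 2)).length ≤ n := by
            simp only [List.length_drop]; omega
          show solveB (seg.take (seg.length / 2)) c ++
              solveB (seg.drop (seg.length / 2)) (c - 2 * (seg.take (seg.length / 2)).sum) =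
              goRef c 0 seg
          rw [ih _ htake, ih _ hdrop,
              goRef_congr (seg.drop (seg.length / 2)) (c - 2 * (seg.take (seg.length / 2)).sum) 0
                c (seg.take (seg.length / 2)).sum (by ring)]
          have := goRef_append c (seg.take (seg.length / 2)) (seg.drop (seg.length / 2)) 0
          rw [List.take_append_drop, zero_add] at this
          rw [← this]

theorem ports_agree (nums : List Int) :
    leftrightdiffence nums = leftrightdiffence_alt nums := by
  unfold leftrightdiffence leftrightdiffence_alt
  rw [solveB_eq_goRef nums.length nums le_rfl nums.sum]
  have := A_fold_eq_goRef nums.sum 0 [] nums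
  rw [show nums.sum - 0 = nums.sum by ring] at this
  simpa using this

-- ===== VERDICT (by name: the statement is the Claim_ definition above) =====
theorem leftrightdiffence_spec : Claim_equal_leftrightdiffence := by
  intro nums _
  unfold Spec_leftrightdiffence
  exact ports_agree nums
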